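-- pv_equiv track=rewrite | github.com/Exdenta/HryuAutoJobSearch | skill/job-search/scripts/telegram_client.py | _balance_mdv2_entities
-- ===== SOURCE A (Python) =====
-- def _balance_mdv2_entities(text: str) -> str:
--     """Strip UNESCAPED trailing `*`, `_`, backtick tokens if their count is odd.
--
--     Telegram rejects MDv2 messages with an unterminated bold/italic/code entity.
--     If we had to truncate mid-block, we may be left with an odd number of a
--     given marker — walk the text, count only unescaped occurrences, and if the
--     count is odd, strip the LAST unescaped occurrence. Escaped markers (`\\*`,
--     `\\_`, `\\\\``) don't open/close entities so they don't count.
--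
--     This is a last-resort safety net; the primary mitigation is truncating at
--     `_RULE` boundaries (which contain no reserved chars) so entities can't be
--     split in the first place.
--     """
--     for tok in ("*", "_", "`"):
--         # Find positions of UNESCAPED tok (preceding char is not a backslash).
--         positions: list[int] = []
--         for i, ch in enumerate(text):
--             if ch != tok:
--                 continue
--             if i > 0 and text[i - 1] == "\\":
--                 continue
--             positions.append(i)
--         if len(positions) % 2 == 1:
--             last = positions[-1]
--             text = text[:last] + text[last + 1:]
--     return text
-- ===== SOURCE B (Python) =====
-- def _balance_mdv2_entities(text: str) -> str:
--     """One pass: per marker count unescaped occurrences and remember the last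
--     one; then drop, in a single rebuild, the last occurrence of every marker
--     whose count is odd."""
--     star = (0, 0)
--     under = (0, 0)
--     tick = (0, 0)
--     prev = " "
--     for i, ch in enumerate(text):
--         if prev != "\\" and ch == "*":
--             star = (star[0] + 1, i)
--         elif prev != "\\" and ch == "_":
--             under = (under[0] + 1, i)
--         elif prev != "\\" and ch == "`":
--             tick = (tick[0] + 1, i)
--         prev = ch
--     drop = [p[1] for p in (star, under, tick) if p[0] % 2 == 1]
--     return "".join(ch for i, ch in enumerate(text) if i not in drop)
-- ===== Notes on version B (the rewrite author's own statement) =====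
-- stated objective: alternative
-- what changed: A makes three passes, each rescanning and mutating the text per marker; B makes one left-to-right pass recording per marker the count and last index of unescaped occurrences, then rebuilds the string once dropping the last occurrence of each odd-count marker, relying on the fact that removing an unescaped marker never changes another marker's escape status.
import Mathlib
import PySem

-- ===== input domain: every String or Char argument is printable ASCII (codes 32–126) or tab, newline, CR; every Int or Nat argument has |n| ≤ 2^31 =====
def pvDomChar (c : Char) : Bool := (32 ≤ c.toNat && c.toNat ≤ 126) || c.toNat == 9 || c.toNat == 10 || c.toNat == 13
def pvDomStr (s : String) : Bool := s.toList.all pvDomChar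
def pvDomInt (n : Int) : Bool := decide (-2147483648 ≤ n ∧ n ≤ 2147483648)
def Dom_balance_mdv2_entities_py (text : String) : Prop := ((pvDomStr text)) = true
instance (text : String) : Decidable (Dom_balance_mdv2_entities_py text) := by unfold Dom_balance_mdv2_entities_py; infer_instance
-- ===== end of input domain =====

-- B replaces A's three mutate-and-rescan passes by one left-to-right pass that records,
-- per marker, the count and last index of unescaped occurrences, then one rebuild
-- dropping the recorded indices (objective: alternative single-pass decomposition).

-- ===== PORT A =====
-- inner loop of A: `for i, ch in enumerate(text): if ch != tok: continue; if i > 0 and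
-- text[i-1] == "\\": continue; positions.append(i)`; `full` is the whole text, `i` the index
def posAGo (tok : Char) (full : List Char) : List Char → Nat → List Nat
  | [], _ => []
  | c :: rest, i =>
    if c ≠ tok then posAGo tok full rest (i + 1)
    else if 0 < i ∧ full.getD (i - 1) ' ' = '\\' then posAGo tok full rest (i + 1)
    else i :: posAGo tok full rest (i + 1)

def stepA (cs : List Char) (tok : Char) : List Char :=
  let positions := posAGo tok cs cs 0
  if positions.length % 2 = 1 then
    -- positions[-1]; the list is nonempty when its length is odd, so the default is never used
    let last := positions.getLastD 0
    -- text[:last] + text[last+1:], exact since 0 ≤ last < len(text)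
    cs.take last ++ cs.drop (last + 1)
  else cs

def balance_mdv2_entities_py (text : String) : String :=
  String.mk ((['*', '_', '`']).foldl stepA text.toList)

-- ===== PORT B =====
-- B's single pass; state per marker = (count, last index); `prev` starts at the
-- non-backslash sentinel ' ' (Source B uses " "), exact since it is only compared to '\\'
def bGo : List Char → Nat → Char → Nat × Nat → Nat × Nat → Nat × Nat →
    (Nat × Nat) × (Nat × Nat) × (Nat × Nat)
  | [], _, _, s1, s2, s3 => (s1, s2, s3)
  | c :: rest, i, prev, s1, s2, s3 =>
    if prev ≠ '\\' ∧ c = '*' then bGo rest (i + 1) c (s1.1 + 1, i) s2 s3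
    else if prev ≠ '\\' ∧ c = '_' then bGo rest (i + 1) c s1 (s2.1 + 1, i) s3
    else if prev ≠ '\\' ∧ c = '`' then bGo rest (i + 1) c s1 s2 (s3.1 + 1, i)
    else bGo rest (i + 1) c s1 s2 s3

-- Source B's final comprehension: keep ch at index i unless i is a dropped index
def keepGo (drop : List Nat) : List Char → Nat → List Char
  | [], _ => []
  | c :: rest, i => if i ∈ drop then keepGo drop rest (i + 1) else c :: keepGo drop rest (i + 1)

def balance_mdv2_entities_py_alt (text : String) : String :=
  let cs := text.toList
  let r := bGo cs 0 ' ' (0, 0) (0, 0) (0, 0)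
  let drop := ([r.1, r.2.1, r.2.2].filter (fun p => p.1 % 2 = 1)).map (·.2)
  String.mk (keepGo drop cs 0)

-- ===== PRECONDITION & SPEC =====
def Spec_balance_mdv2_entities_py (text : String) (out : String) : Prop := out = balance_mdv2_entities_py_alt text
instance (text : String) (out : String) : Decidable (Spec_balance_mdv2_entities_py text out) := by unfold Spec_balance_mdv2_entities_py; infer_instance

-- ===== CLAIM (what is proved, stated in full; the proofs are below) =====
def Claim_equal_balance_mdv2_entities_py : Prop := ∀ (text : String), Dom_balance_mdv2_entities_py text → Spec_balance_mdv2_entities_py text (balance_mdv2_entities_py text)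

-- ===== LEMMAS AND PROOFS =====

-- reference scan: indices ≥ i (in the ambient numbering) of unescaped `tok` in l,
-- `prev` being the character just before l (sentinel ' ' at the very start)
def occ (tok : Char) : List Char → Nat → Char → List Nat
  | [], _, _ => []
  | c :: rest, i, prev =>
    if c = tok ∧ prev ≠ '\\' then i :: occ tok rest (i + 1) c
    else occ tok rest (i + 1) c

def shiftIdx (p j : Nat) : Nat := if j < p then j else j - 1

-- A's scan equals the reference scan
theorem posAGo_eq_occ (tok : Char) (full : List Char) :
    ∀ (l : List Char) (i : Nat), full.drop i = l →
      posAGo tok full l i = occ tok l i (if i = 0 then ' ' else full.getD (i - 1) ' ') := by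
  intro l
  induction l with
  | nil => intro i _; rfl
  | cons c rest ih =>
    intro i hdrop
    have hc : full.getD i ' ' = c := by
      have h0 : full[i]? = some c := by
        rw [show i = i + 0 by omega, ← List.getElem?_drop, hdrop]; rfl
      simp [List.getD, h0]
    have hrest : full.drop (i + 1) = rest := by
      rw [← List.drop_drop, hdrop]; rfl
    have ihr := ih (i + 1) hrest
    rw [if_neg (by omega : ¬ i + 1 = 0)] at ihr
    simp only [Nat.add_sub_cancel] at ihr
    rw [hc] at ihr
    simp only [posAGo, occ]
    by_cases h1 : c = tok
    · by_cases h2 : 0 < i ∧ full.getD (i - 1) ' ' = '\\'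
      · have hP : (if i = 0 then ' ' else full.getD (i - 1) ' ') = '\\' := by
          rw [if_neg (by omega : ¬ i = 0)]; exact h2.2
        rw [if_neg (by simpa using h1), if_pos h2, if_neg (fun hand => hand.2 hP)]
        exact ihr
      · have hP : (if i = 0 then ' ' else full.getD (i - 1) ' ') ≠ '\\' := by
          by_cases hi : i = 0
          · rw [if_pos hi]; decide
          · rw [if_neg hi]; intro hbs; exact h2 ⟨Nat.pos_of_ne_zero hi, hbs⟩
        rw [if_neg (by simpa using h1), if_neg h2, if_pos ⟨h1, hP⟩, ihr]
    · rw [if_pos h1, if_neg (fun h => h1 h.1)]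
      exact ihr

theorem occ_append (tok : Char) (l1 l2 : List Char) :
    ∀ (i : Nat) (prev : Char),
      occ tok (l1 ++ l2) i prev
        = occ tok l1 i prev ++ occ tok l2 (i + l1.length) (l1.getLastD prev) := by
  induction l1 with
  | nil => intro i prev; simp [occ]
  | cons c rest ih =>
    intro i prev
    simp only [List.cons_append, occ, List.getLastD_cons, List.length_cons]
    have harith : i + (rest.length + 1) = (i + 1) + rest.length := by omega
    by_cases h : c = tok ∧ prev ≠ '\\' <;> simp [h, ih, harith]

theorem occ_prev_congr (tok : Char) (l : List Char) (i : Nat) (p1 p2 : Char)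
    (h : (p1 = '\\') ↔ (p2 = '\\')) : occ tok l i p1 = occ tok l i p2 := by
  cases l with
  | nil => rfl
  | cons c rest =>
    simp only [occ]
    by_cases h1 : c = tok ∧ p1 ≠ '\\'
    · have h2 : c = tok ∧ p2 ≠ '\\' := ⟨h1.1, fun hb => h1.2 (h.mpr hb)⟩
      simp [h1, h2]
    · have h2 : ¬ (c = tok ∧ p2 ≠ '\\') := by
        intro hx; exact h1 ⟨hx.1, fun hb => hx.2 (h.mp hb)⟩
      simp [h1, h2]

theorem occ_shift (tok : Char) (l : List Char) :
    ∀ (k j : Nat) (prev : Char), occ tok l (k + j) prev = (occ tok l j prev).map (· + k) := by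
  induction l with
  | nil => intro k j prev; rfl
  | cons c rest ih =>
    intro k j prev
    simp only [occ]
    have harith : k + j + 1 = k + (j + 1) := by omega
    by_cases h : c = tok ∧ prev ≠ '\\' <;>
      simp [h, harith, ih, Nat.add_comm j k]

theorem occ_mem_bound (tok : Char) (l : List Char) :
    ∀ (i : Nat) (prev : Char) (j : Nat), j ∈ occ tok l i prev → i ≤ j ∧ j < i + l.length := by
  induction l with
  | nil => intro i prev j h; simp [occ] at h
  | cons c rest ih =>
    intro i prev j h
    simp only [occ] at h
    by_cases hc : c = tok ∧ prev ≠ '\\'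
    · simp [hc] at h
      rcases h with h | h
      · simp [h]
      · have := ih _ _ _ h
        constructor <;> [omega; (simp; omega)]
    · simp [hc] at h
      have := ih _ _ _ h
      constructor <;> [omega; (simp; omega)]

theorem occ_mem_char (tok : Char) (l : List Char) :
    ∀ (i : Nat) (prev : Char) (j : Nat), j ∈ occ tok l i prev →
      l.getD (j - i) ' ' = tok ∧ (j = i → prev ≠ '\\') ∧ (i < j → l.getD (j - i - 1) ' ' ≠ '\\') := by
  induction l with
  | nil => intro i prev j h; simp [occ] at h
  | cons c rest ih =>
    intro i prev j h
    simp only [occ] at h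
    have hstep : j ∈ occ tok rest (i + 1) c →
        (c :: rest).getD (j - i) ' ' = tok ∧ (j = i → prev ≠ '\\') ∧
        (i < j → (c :: rest).getD (j - i - 1) ' ' ≠ '\\') := by
      intro hm
      have hb := occ_mem_bound tok rest _ _ _ hm
      have hij : i + 1 ≤ j := hb.1
      obtain ⟨h1, h2, h3⟩ := ih _ _ _ hm
      have hji : j - i = (j - (i + 1)) + 1 := by omega
      refine ⟨by simpa [hji] using h1, by omega, ?_⟩
      intro _
      by_cases hji1 : j = i + 1
      · have := h2 hji1
        simpa [hji1] using this
      · have hlt : i + 1 < j := by omega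
        have := h3 hlt
        have hji2 : j - i - 1 = (j - (i + 1) - 1) + 1 := by omega
        simpa [hji2] using this
    by_cases hc : c = tok ∧ prev ≠ '\\'
    · rw [if_pos hc, List.mem_cons] at h
      rcases h with h | h
      · subst h
        exact ⟨by simpa using hc.1, fun _ => hc.2, by omega⟩
      · exact hstep h
    · rw [if_neg hc] at h
      exact hstep h

theorem getLastD_mem {α : Type} (l : List α) (d : α) (h : l ≠ []) : l.getLastD d ∈ l := by
  cases l with
  | nil => exact absurd rfl h
  | cons c rest =>
    have : (c :: rest).getLastD d = (c :: rest).getLast (by simp) := by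
      simp [List.getLastD_eq_getLast?, List.getLast?_eq_getLast]
    rw [this]
    exact List.getLast_mem _

theorem getLastD_map {α β : Type} (f : α → β) (l : List α) (d : β) (d0 : α) (h : l ≠ []) :
    (l.map f).getLastD d = f (l.getLastD d0) := by
  cases l with
  | nil => exact absurd rfl h
  | cons c rest =>
    have hsome : (c :: rest).getLast?.isSome := by simp
    obtain ⟨a, ha⟩ := Option.isSome_iff_exists.mp hsome
    rw [List.getLastD_eq_getLast?, List.getLastD_eq_getLast?, List.getLast?_map, ha]
    rfl

theorem take_getLastD (l : List Char) (p : Nat) (hp : p ≤ l.length) (d : Char) :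
    (l.take p).getLastD d = if p = 0 then d else l.getD (p - 1) d := by
  cases p with
  | zero => simp
  | succ q =>
    have hq : q < l.length := by omega
    have hs : l.take (q + 1) = l.take q ++ [l[q]] := by
      rw [List.take_succ, List.getElem?_eq_getElem hq]; rfl
    rw [if_neg (Nat.succ_ne_zero q), List.getLastD_eq_getLast?, hs, List.getLast?_concat]
    simp only [Option.getD_some, Nat.add_sub_cancel, List.getD, List.getElem?_eq_getElem hq]

theorem split_at (l : List Char) (p : Nat) (hp : p < l.length) :
    l = l.take p ++ l.getD p ' ' :: l.drop (p + 1) := by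
  have h1 : l.drop p = l[p] :: l.drop (p + 1) := (List.getElem_cons_drop hp).symm
  have h2 : l.getD p ' ' = l[p] := by simp [List.getD, List.getElem?_eq_getElem hp]
  rw [h2, ← h1, List.take_append_drop]

-- removing one unescaped non-`t`, non-backslash character shifts t's scan
theorem occ_erase_shift (t : Char) (cs : List Char) (p : Nat)
    (hp : p < cs.length) (hne : cs.getD p ' ' ≠ t) (hnb : cs.getD p ' ' ≠ '\\')
    (hpred : p = 0 ∨ cs.getD (p - 1) ' ' ≠ '\\') :
    occ t (cs.take p ++ cs.drop (p + 1)) 0 ' ' = (occ t cs 0 ' ').map (shiftIdx p) := by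
  have hul : (cs.take p).length = p := by simp [List.length_take]; omega
  have heq : cs = cs.take p ++ cs.getD p ' ' :: cs.drop (p + 1) := split_at cs p hp
  have hprevU : (cs.take p).getLastD ' ' ≠ '\\' := by
    rw [take_getLastD cs p (le_of_lt hp)]
    rcases hpred with h0 | hps
    · rw [if_pos h0]; decide
    · by_cases h0 : p = 0
      · rw [if_pos h0]; decide
      · rw [if_neg h0]; exact hps
  have hm_ne : ¬ (cs.getD p ' ' = t ∧ (cs.take p).getLastD ' ' ≠ '\\') := fun h => hne h.1
  have h1 : occ t cs 0 ' '
      = occ t (cs.take p) 0 ' '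
        ++ (occ t (cs.drop (p + 1)) p ((cs.take p).getLastD ' ')).map (· + 1) := by
    conv_lhs => rw [heq]
    rw [occ_append, Nat.zero_add, hul]
    congr 1
    simp only [occ]
    rw [if_neg hm_ne, show p + 1 = 1 + p by omega, occ_shift]
    congr 1
    exact occ_prev_congr t _ p _ _ ⟨fun hx => absurd hx hnb, fun hx => absurd hx hprevU⟩
  have h2 : occ t (cs.take p ++ cs.drop (p + 1)) 0 ' '
      = occ t (cs.take p) 0 ' ' ++ occ t (cs.drop (p + 1)) p ((cs.take p).getLastD ' ') := by
    rw [occ_append, Nat.zero_add, hul]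
  rw [h1, h2, List.map_append, List.map_map]
  congr 1
  · have hid : ∀ j ∈ occ t (cs.take p) 0 ' ', shiftIdx p j = j := by
      intro j hj
      have hb := occ_mem_bound t (cs.take p) 0 ' ' j hj
      have : j < p := by omega
      simp [shiftIdx, this]
    rw [List.map_congr_left hid]; simp
  · have hid : ∀ j ∈ occ t (cs.drop (p + 1)) p ((cs.take p).getLastD ' '),
        (shiftIdx p ∘ (· + 1)) j = j := by
      intro j hj
      have hb := occ_mem_bound t (cs.drop (p + 1)) p _ j hj
      have : ¬ j + 1 < p := by omega
      simp [shiftIdx, this]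
    rw [List.map_congr_left hid]; simp

theorem keepGo_nil_drop (l : List Char) : ∀ i, keepGo [] l i = l := by
  induction l with
  | nil => intro i; rfl
  | cons c rest ih => intro i; simp [keepGo, ih]

theorem keepGo_append (D : List Nat) (l1 l2 : List Char) :
    ∀ i, keepGo D (l1 ++ l2) i = keepGo D l1 i ++ keepGo D l2 (i + l1.length) := by
  induction l1 with
  | nil => intro i; simp [keepGo]
  | cons c rest ih =>
    intro i
    have harith : i + (rest.length + 1) = (i + 1) + rest.length := by omega
    by_cases h : i ∈ D <;> simp [keepGo, h, ih, harith]

theorem keepGo_congr (l : List Char) :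
    ∀ (D1 D2 : List Nat) (i1 i2 : Nat),
      (∀ k, k < l.length → ((i1 + k ∈ D1) ↔ (i2 + k ∈ D2))) →
      keepGo D1 l i1 = keepGo D2 l i2 := by
  induction l with
  | nil => intro D1 D2 i1 i2 _; rfl
  | cons c rest ih =>
    intro D1 D2 i1 i2 h
    have h0 : (i1 ∈ D1) ↔ (i2 ∈ D2) := by simpa using h 0 (by simp)
    have hr : keepGo D1 rest (i1 + 1) = keepGo D2 rest (i2 + 1) := by
      apply ih
      intro k hk
      have harith1 : i1 + 1 + k = i1 + (k + 1) := by omega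
      have harith2 : i2 + 1 + k = i2 + (k + 1) := by omega
      rw [harith1, harith2]
      exact h (k + 1) (by simp; omega)
    by_cases hm : i1 ∈ D1
    · simp [keepGo, hm, h0.mp hm, hr]
    · have hm2 : i2 ∉ D2 := fun hx => hm (h0.mpr hx)
      simp [keepGo, hm, hm2, hr]

-- dropping index p first, then the shifted rest, equals dropping all at once
theorem keepGo_erase (cs : List Char) (D : List Nat) (p : Nat)
    (hp : p < cs.length) (hnd : p ∉ D) :
    keepGo (p :: D) cs 0 = keepGo (D.map (shiftIdx p)) (cs.take p ++ cs.drop (p + 1)) 0 := by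
  have hul : (cs.take p).length = p := by simp [List.length_take]; omega
  have heq : cs = cs.take p ++ cs.getD p ' ' :: cs.drop (p + 1) := split_at cs p hp
  conv_lhs => rw [heq]
  rw [keepGo_append, keepGo_append, hul]
  simp only [Nat.zero_add]
  have hmid : keepGo (p :: D) (cs.getD p ' ' :: cs.drop (p + 1)) p
      = keepGo (p :: D) (cs.drop (p + 1)) (p + 1) := by
    simp only [keepGo]
    rw [if_pos (List.mem_cons_self)]
  rw [hmid]
  congr 1
  · apply keepGo_congr
    intro k hk
    rw [hul] at hk
    simp only [Nat.zero_add]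
    constructor
    · intro hkm
      rcases List.mem_cons.mp hkm with hkp | hkD
      · omega
      · exact List.mem_map.mpr ⟨k, hkD, by simp [shiftIdx, hk]⟩
    · intro hkm
      obtain ⟨q, hqD, hq⟩ := List.mem_map.mp hkm
      have hqp : q ≠ p := fun e => hnd (e ▸ hqD)
      have : q = k := by simp only [shiftIdx] at hq; split at hq <;> omega
      exact List.mem_cons_of_mem _ (this ▸ hqD)
  · apply keepGo_congr
    intro k _
    constructor
    · intro hkm
      rcases List.mem_cons.mp hkm with hkp | hkD
      · omega
      · exact List.mem_map.mpr ⟨p + 1 + k, hkD, by simp [shiftIdx]; omega⟩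
    · intro hkm
      obtain ⟨q, hqD, hq⟩ := List.mem_map.mp hkm
      have hqp : q ≠ p := fun e => hnd (e ▸ hqD)
      have : q = p + 1 + k := by simp only [shiftIdx] at hq; split at hq <;> omega
      exact List.mem_cons_of_mem _ (this ▸ hqD)

-- the specification-level step and drop list
def stepS (t : Char) (cs : List Char) : List Char :=
  if (occ t cs 0 ' ').length % 2 = 1 then
    cs.take ((occ t cs 0 ' ').getLastD 0) ++ cs.drop ((occ t cs 0 ' ').getLastD 0 + 1)
  else cs

def dropL (toks : List Char) (cs : List Char) : List Nat :=
  toks.flatMap (fun t => if (occ t cs 0 ' ').length % 2 = 1 then [(occ t cs 0 ' ').getLastD 0] else [])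

theorem stepA_eq_stepS (cs : List Char) (t : Char) : stepA cs t = stepS t cs := by
  have h := posAGo_eq_occ t cs cs 0 (by simp)
  rw [if_pos rfl] at h
  simp only [stepA, stepS, h]

theorem dropL_mem (toks : List Char) (cs : List Char) (d : Nat) (hd : d ∈ dropL toks cs) :
    ∃ t ∈ toks, d ∈ occ t cs 0 ' ' ∧ cs.getD d ' ' = t := by
  obtain ⟨t, ht, hin⟩ := List.mem_flatMap.mp hd
  by_cases hodd : (occ t cs 0 ' ').length % 2 = 1
  · rw [if_pos hodd] at hin
    have hde : d = (occ t cs 0 ' ').getLastD 0 := by simpa using hin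
    have hne : occ t cs 0 ' ' ≠ [] := by
      intro he; rw [he] at hodd; simp at hodd
    have hmem : d ∈ occ t cs 0 ' ' := hde ▸ getLastD_mem _ _ hne
    have hc := (occ_mem_char t cs 0 ' ' d hmem).1
    simp only [Nat.sub_zero] at hc
    exact ⟨t, ht, hmem, hc⟩
  · rw [if_neg hodd] at hin
    simp at hin

theorem dropL_map (rest : List Char) (cs1 cs : List Char) (σ : Nat → Nat)
    (h : ∀ t ∈ rest, occ t cs1 0 ' ' = (occ t cs 0 ' ').map σ) :
    dropL rest cs1 = (dropL rest cs).map σ := by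
  induction rest with
  | nil => rfl
  | cons t rest ih =>
    have ht := h t (List.mem_cons_self)
    have hr := ih (fun t' ht' => h t' (List.mem_cons_of_mem _ ht'))
    simp only [dropL, List.flatMap_cons] at *
    rw [ht, hr, List.map_append, List.length_map]
    congr 1
    by_cases hodd : (occ t cs 0 ' ').length % 2 = 1
    · rw [if_pos hodd, if_pos hodd]
      have hne : occ t cs 0 ' ' ≠ [] := by
        intro he; rw [he] at hodd; simp at hodd
      rw [getLastD_map σ _ 0 0 hne]
      rfl
    · rw [if_neg hodd, if_neg hodd]
      rfl

theorem main_lemma (toks : List Char) :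
    ∀ (cs : List Char), toks.Nodup → (∀ t ∈ toks, t ≠ '\\') →
      toks.foldl (fun cs t => stepS t cs) cs = keepGo (dropL toks cs) cs 0 := by
  induction toks with
  | nil =>
    intro cs _ _
    show cs = keepGo (dropL [] cs) cs 0
    rw [show dropL [] cs = [] from rfl, keepGo_nil_drop]
  | cons t rest ih =>
    intro cs hnd hnb
    have hndr : rest.Nodup := (List.nodup_cons.mp hnd).2
    have htr : t ∉ rest := (List.nodup_cons.mp hnd).1
    have hnbr : ∀ t' ∈ rest, t' ≠ '\\' := fun t' ht' => hnb t' (List.mem_cons_of_mem _ ht')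
    have hnbt : t ≠ '\\' := hnb t (List.mem_cons_self)
    rw [List.foldl_cons]
    by_cases hodd : (occ t cs 0 ' ').length % 2 = 1
    · set p := (occ t cs 0 ' ').getLastD 0 with hpdef
      have hne : occ t cs 0 ' ' ≠ [] := by
        intro he; rw [he] at hodd; simp at hodd
      have hmem : p ∈ occ t cs 0 ' ' := getLastD_mem _ _ hne
      have hb := occ_mem_bound t cs 0 ' ' p hmem
      have hp : p < cs.length := by omega
      have hch := occ_mem_char t cs 0 ' ' p hmem
      have hchar : cs.getD p ' ' = t := by simpa using hch.1
      have hpred : p = 0 ∨ cs.getD (p - 1) ' ' ≠ '\\' := by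
        by_cases h0 : p = 0
        · exact Or.inl h0
        · exact Or.inr (by simpa using hch.2.2 (Nat.pos_of_ne_zero h0))
      have hstep : stepS t cs = cs.take p ++ cs.drop (p + 1) := by
        simp only [stepS, hodd, if_pos, ← hpdef]
      have hshift : ∀ t' ∈ rest, occ t' (cs.take p ++ cs.drop (p + 1)) 0 ' '
          = (occ t' cs 0 ' ').map (shiftIdx p) := by
        intro t' ht'
        exact occ_erase_shift t' cs p hp
          (by rw [hchar]; intro he; exact htr (he ▸ ht'))
          (by rw [hchar]; exact hnbt) hpred
      have hdropmap : dropL rest (cs.take p ++ cs.drop (p + 1))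
          = (dropL rest cs).map (shiftIdx p) := dropL_map rest _ cs _ hshift
      have hpnotin : p ∉ dropL rest cs := by
        intro hin
        obtain ⟨t', ht', _, hc'⟩ := dropL_mem rest cs p hin
        rw [hchar] at hc'
        exact htr (hc' ▸ ht')
      have hE := keepGo_erase cs (dropL rest cs) p hp hpnotin
      rw [hstep, ih _ hndr hnbr, hdropmap]
      have hdl : dropL (t :: rest) cs = p :: dropL rest cs := by
        simp only [dropL, List.flatMap_cons, if_pos hodd, ← hpdef]
        rfl
      rw [hdl, hE]
    · have hstep : stepS t cs = cs := by simp only [stepS, if_neg hodd]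
      have hdl : dropL (t :: rest) cs = dropL rest cs := by
        simp only [dropL, List.flatMap_cons, if_neg hodd]
        rfl
      rw [hstep, ih _ hndr hnbr, hdl]

-- B's pass computes the reference scans' lengths and last indices
theorem bGo_spec (l : List Char) :
    ∀ (i : Nat) (prev : Char) (s1 s2 s3 : Nat × Nat),
      bGo l i prev s1 s2 s3 =
        ((s1.1 + (occ '*' l i prev).length, (occ '*' l i prev).getLastD s1.2),
         (s2.1 + (occ '_' l i prev).length, (occ '_' l i prev).getLastD s2.2),
         (s3.1 + (occ '`' l i prev).length, (occ '`' l i prev).getLastD s3.2)) := by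
  induction l with
  | nil => intro i prev s1 s2 s3; simp [bGo, occ]
  | cons c rest ih =>
    intro i prev s1 s2 s3
    simp only [bGo]
    by_cases h1 : prev ≠ '\\' ∧ c = '*'
    · have o1 : occ '*' (c :: rest) i prev = i :: occ '*' rest (i + 1) c := by
        simp only [occ]; rw [if_pos ⟨h1.2, h1.1⟩]
      have o2 : occ '_' (c :: rest) i prev = occ '_' rest (i + 1) c := by
        simp only [occ]; rw [if_neg (fun hx => by rw [h1.2] at hx; exact absurd hx.1 (by decide))]
      have o3 : occ '`' (c :: rest) i prev = occ '`' rest (i + 1) c := by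
        simp only [occ]; rw [if_neg (fun hx => by rw [h1.2] at hx; exact absurd hx.1 (by decide))]
      rw [if_pos h1, ih, o1, o2, o3]
      simp only [List.length_cons, List.getLastD_cons]
      refine congrArg₂ Prod.mk (congrArg₂ Prod.mk (by omega) rfl) rfl
    · rw [if_neg h1]
      by_cases h2 : prev ≠ '\\' ∧ c = '_'
      · have o1 : occ '*' (c :: rest) i prev = occ '*' rest (i + 1) c := by
          simp only [occ]; rw [if_neg (fun hx => by rw [h2.2] at hx; exact absurd hx.1 (by decide))]
        have o2 : occ '_' (c :: rest) i prev = i :: occ '_' rest (i + 1) c := by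
          simp only [occ]; rw [if_pos ⟨h2.2, h2.1⟩]
        have o3 : occ '`' (c :: rest) i prev = occ '`' rest (i + 1) c := by
          simp only [occ]; rw [if_neg (fun hx => by rw [h2.2] at hx; exact absurd hx.1 (by decide))]
        rw [if_pos h2, ih, o1, o2, o3]
        simp only [List.length_cons, List.getLastD_cons]
        refine congrArg₂ Prod.mk rfl (congrArg₂ Prod.mk (congrArg₂ Prod.mk (by omega) rfl) rfl)
      · rw [if_neg h2]
        by_cases h3 : prev ≠ '\\' ∧ c = '`'
        · have o1 : occ '*' (c :: rest) i prev = occ '*' rest (i + 1) c := by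
            simp only [occ]; rw [if_neg (fun hx => by rw [h3.2] at hx; exact absurd hx.1 (by decide))]
          have o2 : occ '_' (c :: rest) i prev = occ '_' rest (i + 1) c := by
            simp only [occ]; rw [if_neg (fun hx => by rw [h3.2] at hx; exact absurd hx.1 (by decide))]
          have o3 : occ '`' (c :: rest) i prev = i :: occ '`' rest (i + 1) c := by
            simp only [occ]; rw [if_pos ⟨h3.2, h3.1⟩]
          rw [if_pos h3, ih, o1, o2, o3]
          simp only [List.length_cons, List.getLastD_cons]
          refine congrArg₂ Prod.mk rfl (congrArg₂ Prod.mk rfl (congrArg₂ Prod.mk (by omega) rfl))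
        · have o1 : occ '*' (c :: rest) i prev = occ '*' rest (i + 1) c := by
            simp only [occ]; rw [if_neg (fun hx => h1 ⟨hx.2, hx.1⟩)]
          have o2 : occ '_' (c :: rest) i prev = occ '_' rest (i + 1) c := by
            simp only [occ]; rw [if_neg (fun hx => h2 ⟨hx.2, hx.1⟩)]
          have o3 : occ '`' (c :: rest) i prev = occ '`' rest (i + 1) c := by
            simp only [occ]; rw [if_neg (fun hx => h3 ⟨hx.2, hx.1⟩)]
          rw [if_neg h3, ih, o1, o2, o3]

-- ===== VERDICT (by name: the statement is the Claim_ definition above) =====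
set_option maxRecDepth 4000 in
theorem balance_mdv2_entities_py_spec : Claim_equal_balance_mdv2_entities_py := by
  unfold Claim_equal_balance_mdv2_entities_py
  intro text _
  unfold Spec_balance_mdv2_entities_py
  unfold balance_mdv2_entities_py balance_mdv2_entities_py_alt
  set cs := text.toList with hcs
  congr 1
  rw [bGo_spec cs 0 ' ' (0, 0) (0, 0) (0, 0)]
  simp only [Nat.zero_add]
  have hA : (['*', '_', '`']).foldl stepA cs = (['*', '_', '`']).foldl (fun cs t => stepS t cs) cs := by
    simp only [List.foldl_cons, List.foldl_nil, stepA_eq_stepS]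
  have hnodup : (['*', '_', '`'] : List Char).Nodup := by
    simp
  have hnb : ∀ t ∈ (['*', '_', '`'] : List Char), t ≠ '\\' := by
    intro t ht
    simp only [List.mem_cons, List.not_mem_nil, or_false] at ht
    rcases ht with h | h | h <;> (subst h; simp)
  rw [hA, main_lemma ['*', '_', '`'] cs hnodup hnb]
  congr 1
  simp only [dropL, List.flatMap_cons, List.flatMap_nil]
  by_cases h1 : (occ '*' cs 0 ' ').length % 2 = 1 <;>
    by_cases h2 : (occ '_' cs 0 ' ').length % 2 = 1 <;>
      by_cases h3 : (occ '`' cs 0 ' ').length % 2 = 1 <;>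
        simp [h1, h2, h3]
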